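-- pv_equiv track=rewrite | github.com/Kyle-Meyer/Interweaving-Python | tests/test_algorithm.py | generate_interweaved_string
-- ===== SOURCE A (Python) =====
-- def generate_interweaved_string(x_pattern, y_pattern, length):
--     s = ""
--     x_counter = 0
--     y_counter = 0
--
--     for i in range(length):
--         if i % 2 == 0 and i % 3 != 0:
--             s += x_pattern[x_counter % len(x_pattern)]
--             x_counter += 1
--         else:
--             s += y_pattern[y_counter % len(y_pattern)]
--             y_counter += 1
--
--     return s
-- ===== SOURCE B (Python) =====
-- def generate_interweaved_string(x_pattern, y_pattern, length):
--     def x_rank(i):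
--         # closed-form count of x-positions (j % 2 == 0 and j % 3 != 0) below i
--         q, r = i // 6, i % 6
--         return 2 * q + (r > 2) + (r > 4)
--
--     def char_at(i):
--         if i % 2 == 0 and i % 3 != 0:
--             return x_pattern[x_rank(i) % len(x_pattern)]
--         return y_pattern[(i - x_rank(i)) % len(y_pattern)]
--
--     return ''.join(char_at(i) for i in range(length))
-- ===== Notes on version B (the rewrite author's own statement) =====
-- stated objective: alternative
-- what changed: B drops A's running x/y counters and string accumulation: it computes each position's stream rank by a closed-form formula (i//6, i%6) and joins the characters of the index range in one pass.
import Mathlib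
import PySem

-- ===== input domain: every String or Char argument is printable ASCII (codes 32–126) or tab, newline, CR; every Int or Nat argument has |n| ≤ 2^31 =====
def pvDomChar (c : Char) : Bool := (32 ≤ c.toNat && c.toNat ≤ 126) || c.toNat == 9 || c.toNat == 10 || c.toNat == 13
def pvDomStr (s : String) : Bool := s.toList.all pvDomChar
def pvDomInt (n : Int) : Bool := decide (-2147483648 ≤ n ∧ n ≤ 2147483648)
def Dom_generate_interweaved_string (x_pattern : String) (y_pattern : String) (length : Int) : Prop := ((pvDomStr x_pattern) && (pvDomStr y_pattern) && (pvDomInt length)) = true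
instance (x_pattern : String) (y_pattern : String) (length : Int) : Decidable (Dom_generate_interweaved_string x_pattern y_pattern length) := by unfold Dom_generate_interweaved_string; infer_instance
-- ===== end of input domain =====

-- B replaces A's running counters by a closed-form per-position rank; same cost, different decomposition.

-- ===== PORT A =====
-- loop body of A: state = (s, x_counter, y_counter); none = a raise (ZeroDivisionError on an empty pattern)
def pvAstep (xs ys : List Char) (st : Option (List Char × Int × Int)) (i : Int) :
    Option (List Char × Int × Int) :=
  match st with
  | none => none
  | some (s, xc, yc) =>
    if PySem.Int.mod i 2 = 0 ∧ PySem.Int.mod i 3 ≠ 0 then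
      match PySem.Int.mod? xc (xs.length : Int) with
      | none => none
      | some k =>
        match PySem.List.pyGet? xs k with
        | none => none
        | some c => some (s ++ [c], xc + 1, yc)
    else
      match PySem.Int.mod? yc (ys.length : Int) with
      | none => none
      | some k =>
        match PySem.List.pyGet? ys k with
        | none => none
        | some c => some (s ++ [c], xc, yc + 1)

def generate_interweaved_string (x_pattern : String) (y_pattern : String) (length : Int) : String :=
  match (PySem.List.pyRange 0 length 1).foldl
      (pvAstep x_pattern.toList y_pattern.toList) (some ([], 0, 0)) with
  | some (s, _, _) => String.ofList s
  | none => ""          -- unreached under Pre_ (Python raises there)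

-- ===== PORT B =====
-- closed-form rank: number of x-positions below i  (Source B's x_rank)
def pvXrank (i : Int) : Int :=
  2 * PySem.Int.floordiv i 6
    + (if 2 < PySem.Int.mod i 6 then 1 else 0)
    + (if 4 < PySem.Int.mod i 6 then 1 else 0)

-- Source B's char_at; none = a raise (ZeroDivisionError on an empty pattern)
def pvCharAt (xs ys : List Char) (i : Int) : Option Char :=
  if PySem.Int.mod i 2 = 0 ∧ PySem.Int.mod i 3 ≠ 0 then
    match PySem.Int.mod? (pvXrank i) (xs.length : Int) with
    | none => none
    | some k => PySem.List.pyGet? xs k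
  else
    match PySem.Int.mod? (i - pvXrank i) (ys.length : Int) with
    | none => none
    | some k => PySem.List.pyGet? ys k

def generate_interweaved_string_alt (x_pattern : String) (y_pattern : String) (length : Int) : String :=
  match (PySem.List.pyRange 0 length 1).mapM
      (pvCharAt x_pattern.toList y_pattern.toList) with
  | some cs => String.ofList cs
  | none => ""          -- unreached under Pre_ (Python raises there)

-- ===== PRECONDITION & SPEC =====
-- Pre_ excludes exactly the inputs where A raises ZeroDivisionError: a positive length needs a
-- nonempty y_pattern (position 0 is a y-position) and a length above 2 needs a nonempty x_pattern
-- (position 2 is the first x-position).  B raises on the same inputs.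
def Pre_generate_interweaved_string (x_pattern : String) (y_pattern : String) (length : Int) : Prop :=
  (0 < length → y_pattern.toList ≠ []) ∧ (2 < length → x_pattern.toList ≠ [])
instance (x_pattern : String) (y_pattern : String) (length : Int) : Decidable (Pre_generate_interweaved_string x_pattern y_pattern length) := by unfold Pre_generate_interweaved_string; infer_instance

def pvWitness_generate_interweaved_string : String × String × Int := ("ab", "cd", 7)

def Spec_generate_interweaved_string (x_pattern : String) (y_pattern : String) (length : Int) (out : String) : Prop := out = generate_interweaved_string_alt x_pattern y_pattern length
instance (x_pattern : String) (y_pattern : String) (length : Int) (out : String) : Decidable (Spec_generate_interweaved_string x_pattern y_pattern length out) := by unfold Spec_generate_interweaved_string; infer_instance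

-- ===== CLAIM (what is proved, stated in full; the proofs are below) =====
def Claim_equal_generate_interweaved_string : Prop := ∀ (x_pattern : String) (y_pattern : String) (length : Int), Dom_generate_interweaved_string x_pattern y_pattern length → Pre_generate_interweaved_string x_pattern y_pattern length → Spec_generate_interweaved_string x_pattern y_pattern length (generate_interweaved_string x_pattern y_pattern length)

-- ===== LEMMAS AND PROOFS =====

-- Nat version of the closed-form rank
def pvXrankNat (n : Nat) : Nat :=
  2 * (n / 6) + (if 2 < n % 6 then 1 else 0) + (if 4 < n % 6 then 1 else 0)

lemma pvXrank_natCast (n : Nat) : pvXrank (n : Int) = (pvXrankNat n : Int) := by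
  simp [pvXrank, pvXrankNat]
  split_ifs <;> omega

lemma pvXrankNat_le (n : Nat) : pvXrankNat n ≤ n := by
  unfold pvXrankNat; split_ifs <;> omega

lemma pvXrankNat_succ (n : Nat) :
    pvXrankNat (n + 1) = pvXrankNat n + (if n % 2 = 0 ∧ n % 3 ≠ 0 then 1 else 0) := by
  unfold pvXrankNat; split_ifs <;> omega

-- main loop invariant: A's fold carries exactly the closed-form counters and both sides build the same list
lemma pv_loop (xs ys : List Char) (n : Nat)
    (hy : 0 < n → ys ≠ []) (hx : 2 < n → xs ≠ []) :
    ∃ s : List Char,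
      (PySem.List.pyRange 0 (n : Int) 1).foldl (pvAstep xs ys) (some ([], 0, 0)) =
          some (s, (pvXrankNat n : Int), ((n - pvXrankNat n : Nat) : Int)) ∧
      (PySem.List.pyRange 0 (n : Int) 1).mapM (pvCharAt xs ys) = some s := by
  induction n with
  | zero =>
      refine ⟨[], ?_, ?_⟩ <;> simp [pvXrankNat]
  | succ n ih =>
      obtain ⟨s, hA, hB⟩ := ih (fun h => hy (by omega)) (fun h => hx (by omega))
      have hrange : PySem.List.pyRange 0 ((n+1 : Nat) : Int) 1 =
          PySem.List.pyRange 0 (n : Int) 1 ++ [(n : Int)] := by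
        push_cast
        exact PySem.List.pyRange_one_succ_right (by positivity)
      rw [hrange, List.foldl_append, hA, List.mapM_append, hB]
      by_cases hp : n % 2 = 0 ∧ n % 3 ≠ 0
      · -- x-branch
        have hn2 : 2 ≤ n := by omega
        have hxs : xs ≠ [] := hx (by omega)
        have hlen : 0 < xs.length := List.length_pos_iff.mpr hxs
        have hcond : PySem.Int.mod (n : Int) 2 = 0 ∧ PySem.Int.mod (n : Int) 3 ≠ 0 := by
          rw [PySem.Int.mod_eq_emod_of_pos (by norm_num : (0:Int) < 2), PySem.Int.mod_eq_emod_of_pos (by norm_num : (0:Int) < 3)]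
          omega
        have hk : PySem.Int.mod? ((pvXrankNat n : Nat) : Int) (xs.length : Int) =
            some ((pvXrankNat n % xs.length : Nat) : Int) := by
          have hb : (xs.length : Int) ≠ 0 := by omega
          rw [PySem.Int.mod?, if_neg hb]
          norm_num [Int.fmod_eq_emod]
        have hidx : pvXrankNat n % xs.length < xs.length := Nat.mod_lt _ hlen
        have hget : PySem.List.pyGet? xs ((pvXrankNat n % xs.length : Nat) : Int) =
            some (xs[pvXrankNat n % xs.length]) := by
          rw [PySem.List.pyGet?_natCast]
          exact List.getElem?_eq_getElem hidx
        refine ⟨s ++ [xs[pvXrankNat n % xs.length]], ?_, ?_⟩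
        · simp only [List.foldl_cons, List.foldl_nil, pvAstep, if_pos hcond, hk, hget]
          have h1 : (pvXrankNat n : Int) + 1 = (pvXrankNat (n+1) : Int) := by
            rw [pvXrankNat_succ, if_pos hp]; push_cast; ring
          have h2 : ((n - pvXrankNat n : Nat) : Int) = ((n + 1 - pvXrankNat (n+1) : Nat) : Int) := by
            have := pvXrankNat_le n
            rw [pvXrankNat_succ, if_pos hp]; push_cast [Nat.sub_add_cancel]; omega
          rw [h1, h2]
        · have hchar : pvCharAt xs ys (n : Int) = some (xs[pvXrankNat n % xs.length]) := by
            rw [pvCharAt, if_pos hcond, pvXrank_natCast, hk]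
            exact hget
          simp [hchar]
      · -- y-branch
        have hys : ys ≠ [] := hy (by omega)
        have hlen : 0 < ys.length := List.length_pos_iff.mpr hys
        have hcond : ¬ (PySem.Int.mod (n : Int) 2 = 0 ∧ PySem.Int.mod (n : Int) 3 ≠ 0) := by
          rw [PySem.Int.mod_eq_emod_of_pos (by norm_num : (0:Int) < 2), PySem.Int.mod_eq_emod_of_pos (by norm_num : (0:Int) < 3)]
          omega
        have hcast : ((n : Int) - ((pvXrankNat n : Nat) : Int)) = ((n - pvXrankNat n : Nat) : Int) := by
          have := pvXrankNat_le n
          omega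
        have hk : PySem.Int.mod? ((n - pvXrankNat n : Nat) : Int) (ys.length : Int) =
            some (((n - pvXrankNat n) % ys.length : Nat) : Int) := by
          have hb : (ys.length : Int) ≠ 0 := by omega
          rw [PySem.Int.mod?, if_neg hb]
          norm_num [Int.fmod_eq_emod]
        have hidx : (n - pvXrankNat n) % ys.length < ys.length := Nat.mod_lt _ hlen
        have hget : PySem.List.pyGet? ys (((n - pvXrankNat n) % ys.length : Nat) : Int) =
            some (ys[(n - pvXrankNat n) % ys.length]) := by
          rw [PySem.List.pyGet?_natCast]
          exact List.getElem?_eq_getElem hidx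
        refine ⟨s ++ [ys[(n - pvXrankNat n) % ys.length]], ?_, ?_⟩
        · simp only [List.foldl_cons, List.foldl_nil, pvAstep, if_neg hcond, hk, hget]
          have h1 : (pvXrankNat n : Int) = (pvXrankNat (n+1) : Int) := by
            rw [pvXrankNat_succ, if_neg hp]; push_cast; ring
          have h2 : ((n - pvXrankNat n : Nat) : Int) + 1 = ((n + 1 - pvXrankNat (n+1) : Nat) : Int) := by
            have := pvXrankNat_le n
            rw [pvXrankNat_succ, if_neg hp]; omega
          rw [h1, h2]
        · have hchar : pvCharAt xs ys (n : Int) = some (ys[(n - pvXrankNat n) % ys.length]) := by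
            rw [pvCharAt, if_neg hcond, pvXrank_natCast, hcast, hk]
            exact hget
          simp [hchar]

-- ===== VERDICT (by name: the statement is the Claim_ definition above) =====
theorem generate_interweaved_string_spec : Claim_equal_generate_interweaved_string := by
  intro x y length _ hpre
  unfold Spec_generate_interweaved_string
  unfold generate_interweaved_string generate_interweaved_string_alt
  by_cases hlen : length ≤ 0
  · rw [PySem.List.pyRange_one_eq_nil (by omega)]
    simp
  · have hℓ : length = ((length.toNat : Nat) : Int) := by omega
    obtain ⟨s, hA, hB⟩ := pv_loop x.toList y.toList length.toNat
      (fun h => hpre.1 (by omega)) (fun h => hpre.2 (by omega))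
    rw [hℓ, hA, hB]
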